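-- pv_equiv track=rewrite | github.com/gercoweststeijn/adventsofcode2023 | 010/main.py | form_grid
-- ===== SOURCE A (Python) =====
-- def form_grid (XY,lines, s):
--     grid = []
--     for y, line in enumerate(lines):
--         nl = ''
--         for x, ch in enumerate(line):
--             if not ((x,y) in XY):
--                 nl = nl + '.'
--             else:
--                 if ch == 'S':
--                     nl = nl + s
--                 else:
--                     nl = nl + line[x]
--         grid.append(nl)
--
--
--
--     return grid
-- ===== SOURCE B (Python) =====
-- def form_grid(XY, lines, s):
--     rows = [['.'] * len(line) for line in lines]
--     for x, y in XY:
--         if 0 <= y < len(lines):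
--             line = lines[y]
--             if 0 <= x < len(line):
--                 rows[y][x] = s if line[x] == 'S' else line[x]
--     return [''.join(r) for r in rows]
-- ===== Notes on version B (the rewrite author's own statement) =====
-- stated objective: faster
-- what changed: Instead of scanning every cell and testing list membership in XY per cell, B pre-fills dot rows once and writes only the (sparse, in-range) coordinates from XY into them.
import Mathlib
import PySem

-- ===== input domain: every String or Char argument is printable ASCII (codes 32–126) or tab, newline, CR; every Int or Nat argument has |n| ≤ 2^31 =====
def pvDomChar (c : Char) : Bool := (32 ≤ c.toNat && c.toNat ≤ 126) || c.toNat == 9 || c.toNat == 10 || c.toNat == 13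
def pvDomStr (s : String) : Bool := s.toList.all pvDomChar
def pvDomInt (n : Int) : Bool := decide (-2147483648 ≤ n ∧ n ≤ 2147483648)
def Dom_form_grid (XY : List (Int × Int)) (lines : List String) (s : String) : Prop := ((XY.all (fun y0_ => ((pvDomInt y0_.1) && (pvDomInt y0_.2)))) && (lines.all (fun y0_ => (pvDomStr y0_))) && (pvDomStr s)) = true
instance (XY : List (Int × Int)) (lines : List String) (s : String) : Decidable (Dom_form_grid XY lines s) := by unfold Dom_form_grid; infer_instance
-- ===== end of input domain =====

-- B rebuilds the grid sparsely: pre-fill dot rows, then write only the in-range path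
-- coordinates from XY (alternative decomposition; return values proved equal to A's).

-- ===== PORT A =====
-- A: nested enumerate over lines and chars, appending per-cell strings; row strings are
-- built as their char lists (String.ofList at row end) so the kernel can evaluate them.
def form_grid (XY : List (Int × Int)) (lines : List String) (s : String) : List String :=
  (PySem.List.enumerate lines 0).foldl (fun grid yl =>
    grid ++ [String.ofList ((PySem.List.enumerate yl.2.toList 0).foldl (fun nl xc =>
      if ¬ ((xc.1, yl.1) ∈ XY) then nl ++ ['.']
      else if xc.2 = 'S' then nl ++ s.toList
      else nl ++ [(PySem.List.pyGet? yl.2.toList xc.1).getD xc.2]) [])]) []  -- line[x]; enumerate index is always in range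

-- ===== PORT B =====
-- cell value written for an in-range path coordinate: s if line[x]=='S' else line[x]
def pvCellB (line : List Char) (s : String) (x : Nat) : List Char :=
  if line.getD x ' ' = 'S' then s.toList else [line.getD x ' ']

-- one iteration of B's 'for x, y in XY' loop: bounds-guarded in-place write
def pvWrite (lines : List String) (s : String) (rows : List (List (List Char))) (p : Int × Int) : List (List (List Char)) :=
  if 0 ≤ p.2 ∧ p.2.toNat < lines.length then
    if 0 ≤ p.1 ∧ p.1.toNat < ((lines.getD p.2.toNat "").toList).length then
      rows.set p.2.toNat ((rows.getD p.2.toNat []).set p.1.toNat (pvCellB ((lines.getD p.2.toNat "").toList) s p.1.toNat))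
    else rows
  else rows

def form_grid_alt (XY : List (Int × Int)) (lines : List String) (s : String) : List String :=
  (XY.foldl (pvWrite lines s)
      (lines.map (fun line => line.toList.map (fun _ => (['.'] : List Char))))).map
    (fun r => String.ofList r.flatten)   -- ''.join(r)

-- ===== PRECONDITION & SPEC =====
def Spec_form_grid (XY : List (Int × Int)) (lines : List String) (s : String) (out : List String) : Prop := out = form_grid_alt XY lines s
instance (XY : List (Int × Int)) (lines : List String) (s : String) (out : List String) : Decidable (Spec_form_grid XY lines s out) := by unfold Spec_form_grid; infer_instance

-- ===== CLAIM (what is proved, stated in full; the proofs are below) =====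
def Claim_equal_form_grid : Prop := ∀ (XY : List (Int × Int)) (lines : List String) (s : String), Dom_form_grid XY lines s → Spec_form_grid XY lines s (form_grid XY lines s)

-- ===== LEMMAS AND PROOFS =====

-- the per-cell value both programs agree on
def pvCell (XY : List (Int × Int)) (s : String) (line : List Char) (y : Nat) (x : Nat) : List Char :=
  if ((x : Int), (y : Int)) ∈ XY then pvCellB line s x else ['.']

-- shape invariant for B's row buffers
def pvShape (lines : List String) (rows : List (List (List Char))) : Prop :=
  rows.length = lines.length ∧
  ∀ y : Nat, (rows.getD y []).length = ((lines.getD y "").toList).length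

theorem pvWrite_shape (lines : List String) (s : String) (rows : List (List (List Char)))
    (p : Int × Int) (h : pvShape lines rows) : pvShape lines (pvWrite lines s rows p) := by
  obtain ⟨hl, hr⟩ := h
  unfold pvWrite pvShape
  split_ifs with h1 h2
  · refine ⟨by simpa using hl, fun y => ?_⟩
    by_cases hy : y = p.2.toNat
    · subst hy
      simp only [List.getD]
      rw [List.getElem?_set_self (by omega), Option.getD_some, List.length_set]
      have := hr p.2.toNat
      simpa [List.getD] using this
    · simp only [List.getD]
      rw [List.getElem?_set_ne (by omega)]
      simpa [List.getD] using hr y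
  · exact ⟨hl, hr⟩
  · exact ⟨hl, hr⟩

theorem pvFold_shape (lines : List String) (s : String) (XY : List (Int × Int))
    (rows : List (List (List Char))) (h : pvShape lines rows) :
    pvShape lines (XY.foldl (pvWrite lines s) rows) := by
  induction XY generalizing rows with
  | nil => exact h
  | cons p t ih => exact ih _ (pvWrite_shape lines s rows p h)

-- the initial all-dots buffer has the right shape
theorem pvShape0 (lines : List String) :
    pvShape lines (lines.map (fun line => line.toList.map (fun _ => (['.'] : List Char)))) := by
  constructor
  · rw [List.length_map]
  · intro y
    simp only [List.getD]
    by_cases hy : y < lines.length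
    · simp [List.getElem?_map, List.getElem?_eq_getElem hy]
    · simp [List.getElem?_map, List.getElem?_eq_none (by omega : lines.length ≤ y)]

-- main invariant: cell (y,x) of the folded buffers
theorem pvFold_cell (lines : List String) (s : String) (XY : List (Int × Int))
    (rows : List (List (List Char))) (h : pvShape lines rows)
    (y x : Nat) (hy : y < lines.length) (hx : x < ((lines.getD y "").toList).length) :
    (((XY.foldl (pvWrite lines s) rows).getD y []).getD x []) =
      if ((x : Int), (y : Int)) ∈ XY then pvCellB ((lines.getD y "").toList) s x
      else ((rows.getD y []).getD x []) := by
  induction XY generalizing rows with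
  | nil => simp
  | cons p t ih =>
    rw [List.foldl_cons, ih _ (pvWrite_shape lines s rows p h)]
    by_cases hmem : ((x : Int), (y : Int)) ∈ t
    · simp [hmem, List.mem_cons.mpr (Or.inr hmem)]
    · rw [if_neg hmem]
      by_cases hp : p = ((x : Int), (y : Int))
      · subst hp
        rw [if_pos (by simp)]
        unfold pvWrite
        rw [if_pos ⟨Int.natCast_nonneg y, by simpa using hy⟩]
        rw [if_pos ⟨Int.natCast_nonneg x, by simpa using hx⟩]
        have hylen : y < rows.length := by rw [h.1]; exact hy
        have hxlen : x < ((rows.getD y []).length) := by rw [h.2 y]; exact hx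
        simp only [Int.toNat_natCast, List.getD]
        rw [List.getElem?_set_self (by simpa using hylen), Option.getD_some,
          List.getElem?_set_self (by simpa [List.getD] using hxlen), Option.getD_some]
      · have hmem' : ¬ ((x : Int), (y : Int)) ∈ (p :: t) := by
          intro hc
          rcases List.mem_cons.mp hc with hc | hc
          · exact hp (Eq.symm hc)
          · exact hmem hc
        rw [if_neg hmem']
        unfold pvWrite
        split_ifs with h1 h2
        · obtain ⟨hb, hblen⟩ := h1
          obtain ⟨ha, halen⟩ := h2
          by_cases hyy : p.2.toNat = y
          · by_cases hxx : p.1.toNat = x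
            · exfalso
              apply hp
              have hpp : p = (p.1, p.2) := rfl
              rw [hpp, show p.1 = ((x : Int)) from by omega, show p.2 = ((y : Int)) from by omega]
            · simp only [List.getD]
              rw [hyy, List.getElem?_set_self (by rw [h.1]; omega), Option.getD_some,
                List.getElem?_set_ne (by omega)]
          · simp only [List.getD]
            rw [List.getElem?_set_ne (by omega)]
        · rfl
        · rfl

-- the initial buffer's cells are all dots (in range)
theorem pvRows0_cell (lines : List String) (y x : Nat) (hy : y < lines.length)
    (hx : x < ((lines.getD y "").toList).length) :
    (((lines.map (fun line => line.toList.map (fun _ => (['.'] : List Char)))).getD y []).getD x []) = ['.'] := by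
  have hx' : x < (lines[y].toList).length := by
    rwa [List.getD_eq_getElem lines "" hy] at hx
  simp only [List.getD]
  rw [List.getElem?_map, List.getElem?_eq_getElem hy, Option.map_some, Option.getD_some,
    List.getElem?_map, List.getElem?_eq_getElem hx', Option.map_some, Option.getD_some]

-- A's inner loop as a flatMap of the per-cell branches
theorem pvRowA (XY : List (Int × Int)) (s : String) (line : String) (y : Int) (acc : List Char) :
    ((PySem.List.enumerate line.toList 0).foldl (fun nl xc =>
      if ¬ ((xc.1, y) ∈ XY) then nl ++ ['.']
      else if xc.2 = 'S' then nl ++ s.toList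
      else nl ++ [(PySem.List.pyGet? line.toList xc.1).getD xc.2]) acc) =
    acc ++ (PySem.List.enumerate line.toList 0).flatMap (fun xc =>
      if ¬ ((xc.1, y) ∈ XY) then ['.']
      else if xc.2 = 'S' then s.toList
      else [(PySem.List.pyGet? line.toList xc.1).getD xc.2]) := by
  rw [← PySem.List.foldl_append_eq_flatMap]
  apply PySem.List.foldl_congr_mem
  intro b a _
  split_ifs <;> rfl

-- the flatMap over enumerate is the flatMap of pvCell over the index range
theorem pvFlatMap_enumerate_cell (XY : List (Int × Int)) (s : String) (line : String) (y : Nat) :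
    (PySem.List.enumerate line.toList 0).flatMap (fun xc =>
      if ¬ ((xc.1, (y : Int)) ∈ XY) then ['.']
      else if xc.2 = 'S' then s.toList
      else [(PySem.List.pyGet? line.toList xc.1).getD xc.2]) =
    (List.range line.toList.length).flatMap (fun x => pvCell XY s line.toList y x) := by
  rw [List.flatMap_def, List.flatMap_def]
  congr 1
  apply List.ext_getElem
  · rw [List.length_map, List.length_map, PySem.List.length_enumerate, List.length_range]
  · intro k hk1 hk2
    rw [List.getElem_map, List.getElem_map, PySem.List.getElem_enumerate, List.getElem_range]
    have hk : k < line.toList.length := by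
      rwa [List.length_map, PySem.List.length_enumerate] at hk1
    simp only [Int.zero_add]
    unfold pvCell pvCellB
    by_cases hmem : (((k : Int)), ((y : Int))) ∈ XY
    · rw [if_neg (by simpa using hmem), if_pos hmem]
      have hg : PySem.List.pyGet? line.toList ((k : Int)) = some line.toList[k] := by
        rw [PySem.List.pyGet?_natCast, List.getElem?_eq_getElem hk]
      rw [hg, Option.getD_some, List.getD_eq_getElem _ _ hk]
    · rw [if_pos (by simpa using hmem), if_neg hmem]

-- B's finished row y equals the range-flatMap of the per-cell value
theorem pvRowB (XY : List (Int × Int)) (lines : List String) (s : String) (y : Nat)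
    (hy : y < lines.length) :
    ((XY.foldl (pvWrite lines s)
        (lines.map (fun line => line.toList.map (fun _ => (['.'] : List Char))))).getD y []).flatten =
    (List.range ((lines.getD y "").toList).length).flatMap
      (fun x => pvCell XY s ((lines.getD y "").toList) y x) := by
  have hshape := pvFold_shape lines s XY _ (pvShape0 lines)
  rw [List.flatMap_def]
  have hrow : (XY.foldl (pvWrite lines s)
        (lines.map (fun line => line.toList.map (fun _ => (['.'] : List Char))))).getD y [] =
      (List.range ((lines.getD y "").toList).length).map
        (fun x => pvCell XY s ((lines.getD y "").toList) y x) := by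
    apply List.ext_getElem
    · rw [List.length_map, List.length_range, hshape.2 y]
    · intro k hk1 hk2
      rw [List.getElem_map, List.getElem_range]
      have hk : k < ((lines.getD y "").toList).length := by
        rwa [hshape.2 y] at hk1
      have hc := pvFold_cell lines s XY _ (pvShape0 lines) y k hy hk
      rw [List.getD_eq_getElem _ _ hk1] at hc
      rw [hc, pvRows0_cell lines y k hy hk]
      unfold pvCell
      rfl
  rw [hrow]

-- ===== VERDICT (by name: the statement is the Claim_ definition above) =====
theorem form_grid_spec : Claim_equal_form_grid := by
  intro XY lines s _
  unfold Spec_form_grid form_grid form_grid_alt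
  rw [PySem.List.foldl_append_singleton_eq_map, List.nil_append]
  have hlen : (XY.foldl (pvWrite lines s)
      (lines.map (fun line => line.toList.map (fun _ => (['.'] : List Char))))).length = lines.length :=
    (pvFold_shape lines s XY _ (pvShape0 lines)).1
  apply List.ext_getElem
  · rw [List.length_map, List.length_map, PySem.List.length_enumerate, hlen]
  · intro y hy1 hy2
    rw [List.getElem_map, List.getElem_map, PySem.List.getElem_enumerate]
    have hy : y < lines.length := by
      rwa [List.length_map, PySem.List.length_enumerate] at hy1
    have hyF : y < (XY.foldl (pvWrite lines s)
        (lines.map (fun line => line.toList.map (fun _ => (['.'] : List Char))))).length := by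
      rw [hlen]; exact hy
    simp only [Int.zero_add]
    rw [pvRowA, List.nil_append, pvFlatMap_enumerate_cell XY s lines[y] y,
      ← List.getD_eq_getElem (XY.foldl (pvWrite lines s) _) [] hyF,
      pvRowB XY lines s y hy, List.getD_eq_getElem lines "" hy]
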